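-- pv_equiv track=rewrite | github.com/datacommonsorg/website | tools/nl/svindex_differ/differ.py | _get_diff_table
-- ===== SOURCE A (Python) =====
-- _SUB_COLOR = '#ffaaaa'
--
-- _ADD_COLOR = '#aaffaa'
--
-- def _get_diff_table(diff_list, base_sv_info, test_sv_info):
--   """Given a list of diffs produced by the difflib.Differ, get the rows of
--   sv information to show in the diff table.
--   """
--   diff_table_rows = []
--   last_added = -1
--   for i, diff in enumerate(diff_list):
--     if i <= last_added:
--       continue
--     last_added = i
--     # difflib.Differ will add 2 characters in front of the original text for every line.
--     diff_sv = diff[2:]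
--     next_diff = None
--     if i < len(diff_list) - 1:
--       next_diff = diff_list[i + 1]
--     # If the line starts with ?, this means it is not present in either base or test.
--     # https://docs.python.org/3/library/difflib.html#difflib.Differ
--     if diff.startswith('?'):
--       continue
--     # If theres no + or -, that means this line is the same in both base and test.
--     elif not diff.startswith('+') and not diff.startswith('-'):
--       base_info = base_sv_info.get(diff_sv, {})
--       test_info = test_sv_info.get(diff_sv, {})
--       diff_table_rows.append((base_info, test_info))
--     # If the line starts with -, this means it was present in base but not in test.
--     elif diff.startswith('-'):
--       base_info = base_sv_info.get(diff_sv, {})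
--       base_info['color'] = _SUB_COLOR
--       test_info = {}
--       if next_diff and next_diff.startswith('+'):
--         test_sv = next_diff[2:]
--         test_info = test_sv_info.get(test_sv, {})
--         test_info['color'] = _ADD_COLOR
--         last_added = i + 1
--       diff_table_rows.append((base_info, test_info))
--     # Otherwise, the line started with +, which means it was present in test but not base.
--     else:
--       base_info = {}
--       test_info = test_sv_info.get(diff_sv, {})
--       test_info['color'] = _ADD_COLOR
--       if next_diff and next_diff.startswith('-'):
--         base_sv = next_diff[2:]
--         base_info = base_sv_info.get(base_sv, {})
--         base_info['color'] = _SUB_COLOR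
--         last_added = i + 1
--       diff_table_rows.append((base_info, test_info))
--   return diff_table_rows
-- ===== SOURCE B (Python) =====
-- # B: a deferred-emission automaton — a plain fold over the lines carrying one
-- # 'pending' +/- line (look-BEHIND), flushed at the end; no indices, no lookahead,
-- # no skip sentinel.  B builds fresh colored dicts and does NOT mutate the dicts
-- # stored in base_sv_info/test_sv_info (A does); equivalence is about the return value.
-- _SUB_COLOR = '#ffaaaa'
--
-- _ADD_COLOR = '#aaffaa'
--
--
-- def _colored(info_map, line, color):
--   d = dict(info_map.get(line[2:], {}))
--   d['color'] = color
--   return d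
--
--
-- def _alone(pending, base_sv_info, test_sv_info):
--   if pending.startswith('-'):
--     return (_colored(base_sv_info, pending, _SUB_COLOR), {})
--   return ({}, _colored(test_sv_info, pending, _ADD_COLOR))
--
--
-- def _get_diff_table(diff_list, base_sv_info, test_sv_info):
--   rows = []
--   pending = None
--   for line in diff_list:
--     if pending is not None:
--       if pending.startswith('-'):
--         if line.startswith('+'):
--           rows.append((_colored(base_sv_info, pending, _SUB_COLOR),
--                        _colored(test_sv_info, line, _ADD_COLOR)))
--           pending = None
--           continue
--       else:
--         if line.startswith('-'):
--           rows.append((_colored(base_sv_info, line, _SUB_COLOR),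
--                        _colored(test_sv_info, pending, _ADD_COLOR)))
--           pending = None
--           continue
--       rows.append(_alone(pending, base_sv_info, test_sv_info))
--       pending = None
--     if line.startswith('?'):
--       continue
--     if line.startswith('-') or line.startswith('+'):
--       pending = line
--     else:
--       sv = line[2:]
--       rows.append((base_sv_info.get(sv, {}), test_sv_info.get(sv, {})))
--   if pending is not None:
--     rows.append(_alone(pending, base_sv_info, test_sv_info))
--   return rows
-- ===== Notes on version B (the rewrite author's own statement) =====
-- stated objective: alternative
-- what changed: Replaces the enumerate + lookahead-at-i+1 + last_added sentinel-skip loop by a deferred-emission automaton: a plain fold over the lines carrying one 'pending' +/- line (look-behind state) that pairs it with the current line or flushes it, with a final flush after the loop, and it builds the colored row dicts as fresh copies instead of mutating the dicts stored in base_sv_info/test_sv_info in place.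
import Mathlib
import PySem

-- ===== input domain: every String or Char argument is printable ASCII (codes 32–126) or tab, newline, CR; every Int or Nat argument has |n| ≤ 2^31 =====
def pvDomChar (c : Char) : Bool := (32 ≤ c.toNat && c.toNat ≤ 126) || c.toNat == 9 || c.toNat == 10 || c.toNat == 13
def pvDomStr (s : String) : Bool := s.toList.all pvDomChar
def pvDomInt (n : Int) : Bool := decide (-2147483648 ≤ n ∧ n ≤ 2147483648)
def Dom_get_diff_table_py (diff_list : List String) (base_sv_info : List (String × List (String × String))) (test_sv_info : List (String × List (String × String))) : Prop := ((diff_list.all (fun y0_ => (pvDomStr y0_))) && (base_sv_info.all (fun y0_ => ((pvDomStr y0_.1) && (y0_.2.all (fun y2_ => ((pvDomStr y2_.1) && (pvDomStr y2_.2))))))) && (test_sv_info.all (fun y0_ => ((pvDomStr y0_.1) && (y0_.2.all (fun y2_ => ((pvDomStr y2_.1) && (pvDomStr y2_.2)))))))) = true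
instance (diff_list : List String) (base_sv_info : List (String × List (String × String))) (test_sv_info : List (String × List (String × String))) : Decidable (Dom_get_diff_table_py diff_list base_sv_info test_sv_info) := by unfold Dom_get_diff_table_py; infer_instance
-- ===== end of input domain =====

-- B replaces A's enumerate + lookahead + last_added sentinel loop by a deferred-emission
-- automaton: a plain fold over the lines carrying one 'pending' +/- line (look-behind),
-- flushed at the end, and it builds fresh colored dicts instead of mutating the dicts
-- stored in base_sv_info/test_sv_info in place (A does mutate them); the equivalence
-- claimed is about the return value only.

-- shared vocabulary of both Pythons: diff[2:], dict.get(sv, {}), d['color'] = c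
def pvPayload (s : String) : String := PySem.Str.slice s (some 2) none

def pvGetInfo (d : List (String × List (String × String))) (k : String) : List (String × String) :=
  (List.lookup k d).getD []

-- d['color'] = c on an insertion-ordered dict: overwrite in place, new key appends
def pvSetColor (c : String) : List (String × String) → List (String × String)
  | [] => [("color", c)]
  | (k, v) :: rest => if k = "color" then ("color", c) :: rest else (k, v) :: pvSetColor c rest

-- write the mutated dict back to the store it came from (no-op if the key is absent:
-- then Python's .get returned a fresh dict and the store is untouched)
def pvStoreSet (k : String) (info : List (String × String)) :
    List (String × List (String × String)) → List (String × List (String × String))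
  | [] => []
  | (k', v) :: rest => if k' = k then (k', info) :: rest else (k', v) :: pvStoreSet k info rest

-- ===== PORT A =====
-- loop body of A's `for i, diff in enumerate(diff_list)`, state (rows, last_added, base, test);
-- the in-place `['color']` mutations are threaded back into the stores with pvStoreSet
-- (retroactive mutation of already-appended rows is not representable; Pre_ excludes it).
def pvStepA (diff_list : List String)
    (st : List ((List (String × String)) × (List (String × String))) × Int ×
          List (String × List (String × String)) × List (String × List (String × String)))
    (p : Int × String) :
    List ((List (String × String)) × (List (String × String))) × Int ×
    List (String × List (String × String)) × List (String × List (String × String)) :=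
  let rows := st.1
  let la := st.2.1
  let b := st.2.2.1
  let t := st.2.2.2
  let i := p.1
  let diff := p.2
  if i ≤ la then st
  else
    let diff_sv := pvPayload diff
    let next_diff : Option String :=
      if i < PySem.List.len diff_list - 1 then PySem.List.pyGet? diff_list (i + 1) else none
    if PySem.Str.startswith diff "?" then (rows, i, b, t)
    else if !PySem.Str.startswith diff "+" && !PySem.Str.startswith diff "-" then
      (rows ++ [(pvGetInfo b diff_sv, pvGetInfo t diff_sv)], i, b, t)
    else if PySem.Str.startswith diff "-" then
      let base_info := pvSetColor "#ffaaaa" (pvGetInfo b diff_sv)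
      let b' := pvStoreSet diff_sv base_info b
      match next_diff with
      | some nd =>
        if !(nd == "") && PySem.Str.startswith nd "+" then
          let test_sv := pvPayload nd
          let test_info := pvSetColor "#aaffaa" (pvGetInfo t test_sv)
          let t' := pvStoreSet test_sv test_info t
          (rows ++ [(base_info, test_info)], i + 1, b', t')
        else (rows ++ [(base_info, [])], i, b', t)
      | none => (rows ++ [(base_info, [])], i, b', t)
    else
      let test_info := pvSetColor "#aaffaa" (pvGetInfo t diff_sv)
      let t' := pvStoreSet diff_sv test_info t
      match next_diff with
      | some nd =>
        if !(nd == "") && PySem.Str.startswith nd "-" then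
          let base_sv := pvPayload nd
          let base_info := pvSetColor "#ffaaaa" (pvGetInfo b base_sv)
          let b' := pvStoreSet base_sv base_info b
          (rows ++ [(base_info, test_info)], i + 1, b', t')
        else (rows ++ [([], test_info)], i, b, t')
      | none => (rows ++ [([], test_info)], i, b, t')

def get_diff_table_py (diff_list : List String) (base_sv_info : List (String × List (String × String))) (test_sv_info : List (String × List (String × String))) : List ((List (String × String)) × (List (String × String))) :=
  (List.foldl (pvStepA diff_list) ([], -1, base_sv_info, test_sv_info)
    (PySem.List.enumerate diff_list 0)).1

-- ===== PORT B =====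
-- Source B's _colored: a fresh copy of info_map.get(line[2:], {}) with ['color'] = color
def pvColored (infoMap : List (String × List (String × String))) (line color : String) :
    List (String × String) :=
  pvSetColor color (pvGetInfo infoMap (pvPayload line))

-- Source B's _alone: the row a lone pending '-' (resp. '+') line produces
def pvAlone (pending : String) (b t : List (String × List (String × String))) :
    (List (String × String)) × (List (String × String)) :=
  if PySem.Str.startswith pending "-" then (pvColored b pending "#ffaaaa", [])
  else ([], pvColored t pending "#aaffaa")

-- Source B's loop: a fold over the lines carrying the Optional pending line, flushed at the end
def pvAutoB (b t : List (String × List (String × String))) :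
    Option String → List String → List ((List (String × String)) × (List (String × String)))
  | none, [] => []
  | some p, [] => [pvAlone p b t]
  | some p, line :: rest =>
    if PySem.Str.startswith p "-" then
      if PySem.Str.startswith line "+" then
        (pvColored b p "#ffaaaa", pvColored t line "#aaffaa") :: pvAutoB b t none rest
      else pvAlone p b t :: pvAutoB b t none (line :: rest)
    else
      if PySem.Str.startswith line "-" then
        (pvColored b line "#ffaaaa", pvColored t p "#aaffaa") :: pvAutoB b t none rest
      else pvAlone p b t :: pvAutoB b t none (line :: rest)
  | none, line :: rest =>
    if PySem.Str.startswith line "?" then pvAutoB b t none rest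
    else if PySem.Str.startswith line "-" || PySem.Str.startswith line "+" then
      pvAutoB b t (some line) rest
    else
      (pvGetInfo b (pvPayload line), pvGetInfo t (pvPayload line)) :: pvAutoB b t none rest
  termination_by pend l => 2 * l.length + (match pend with | some _ => 1 | none => 0)
  decreasing_by all_goals (simp; try omega)

def get_diff_table_py_alt (diff_list : List String) (base_sv_info : List (String × List (String × String))) (test_sv_info : List (String × List (String × String))) : List ((List (String × String)) × (List (String × String))) :=
  pvAutoB base_sv_info test_sv_info none diff_list

-- ===== PRECONDITION & SPEC =====
-- Pre_ excludes inputs where the payload (line[2:]) of a '-' or '+' diff line occurs on more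
-- than one line and is a key of base_sv_info or test_sv_info: exactly there A's rows can alias
-- one mutable stored dict, so the in-place 'color' mutation can leak into other rows — an
-- accident of A's implementation that a return-value equivalence cannot state.
def Pre_get_diff_table_py (diff_list : List String) (base_sv_info : List (String × List (String × String))) (test_sv_info : List (String × List (String × String))) : Prop :=
  ∀ s ∈ diff_list,
    (PySem.Str.startswith s "-" = true ∨ PySem.Str.startswith s "+" = true) →
    1 < (diff_list.map pvPayload).count (pvPayload s) →
    List.lookup (pvPayload s) base_sv_info = none ∧ List.lookup (pvPayload s) test_sv_info = none
instance (diff_list : List String) (base_sv_info : List (String × List (String × String))) (test_sv_info : List (String × List (String × String))) : Decidable (Pre_get_diff_table_py diff_list base_sv_info test_sv_info) := by unfold Pre_get_diff_table_py; infer_instance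

def pvWitness_get_diff_table_py : List String × (List (String × List (String × String))) × (List (String × List (String × String))) :=
  (["- a", "+ b", "  c", "? ^"], [("a", [("t", "1")])], [("b", []), ("c", [("x", "y")])])

def Spec_get_diff_table_py (diff_list : List String) (base_sv_info : List (String × List (String × String))) (test_sv_info : List (String × List (String × String))) (out : List ((List (String × String)) × (List (String × String)))) : Prop := out = get_diff_table_py_alt diff_list base_sv_info test_sv_info
instance (diff_list : List String) (base_sv_info : List (String × List (String × String))) (test_sv_info : List (String × List (String × String))) (out : List ((List (String × String)) × (List (String × String)))) : Decidable (Spec_get_diff_table_py diff_list base_sv_info test_sv_info out) := by unfold Spec_get_diff_table_py; infer_instance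

-- ===== CLAIM (what is proved, stated in full; the proofs are below) =====
def Claim_equal_get_diff_table_py : Prop := ∀ (diff_list : List String) (base_sv_info : List (String × List (String × String))) (test_sv_info : List (String × List (String × String))), Dom_get_diff_table_py diff_list base_sv_info test_sv_info → Pre_get_diff_table_py diff_list base_sv_info test_sv_info → Spec_get_diff_table_py diff_list base_sv_info test_sv_info (get_diff_table_py diff_list base_sv_info test_sv_info)

-- ===== LEMMAS AND PROOFS =====

-- proof-only intermediate: the result of A expressed as a lookahead scan (no index, no stores)
def pvLook (b t : List (String × List (String × String))) :
    List String → List ((List (String × String)) × (List (String × String)))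
  | [] => []
  | line :: rest =>
    if PySem.Str.startswith line "?" then pvLook b t rest
    else if !PySem.Str.startswith line "+" && !PySem.Str.startswith line "-" then
      (pvGetInfo b (pvPayload line), pvGetInfo t (pvPayload line)) :: pvLook b t rest
    else if PySem.Str.startswith line "-" then
      let base_info := pvSetColor "#ffaaaa" (pvGetInfo b (pvPayload line))
      match rest with
      | nxt :: rest' =>
        if PySem.Str.startswith nxt "+" then
          (base_info, pvSetColor "#aaffaa" (pvGetInfo t (pvPayload nxt))) :: pvLook b t rest'
        else (base_info, []) :: pvLook b t (nxt :: rest')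
      | [] => [(base_info, [])]
    else
      let test_info := pvSetColor "#aaffaa" (pvGetInfo t (pvPayload line))
      match rest with
      | nxt :: rest' =>
        if PySem.Str.startswith nxt "-" then
          (pvSetColor "#ffaaaa" (pvGetInfo b (pvPayload nxt)), test_info) :: pvLook b t rest'
        else ([], test_info) :: pvLook b t (nxt :: rest')
      | [] => [([], test_info)]

theorem lookup_pvStoreSet_ne {q k : String} (v : List (String × String))
    (d : List (String × List (String × String))) (h : q ≠ k) :
    List.lookup q (pvStoreSet k v d) = List.lookup q d := by
  induction d with
  | nil => rfl
  | cons hd tl ih =>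
    obtain ⟨k', v'⟩ := hd
    by_cases hk : k' = k
    · subst hk
      simp [pvStoreSet, List.lookup, beq_eq_false_iff_ne.mpr h]
    · simp [pvStoreSet, hk, List.lookup, ih]

theorem pvStoreSet_of_lookup_none {k : String} (v : List (String × String))
    {d : List (String × List (String × String))} (h : List.lookup k d = none) :
    pvStoreSet k v d = d := by
  induction d with
  | nil => rfl
  | cons hd tl ih =>
    obtain ⟨k', v'⟩ := hd
    by_cases hk : k' = k
    · subst hk; simp [List.lookup] at h
    · have h' : List.lookup k tl = none := by
        simpa [List.lookup, beq_eq_false_iff_ne.mpr (Ne.symm hk)] using h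
      simp [pvStoreSet, hk, ih h']

theorem pvWriteKeep {b b' : List (String × List (String × String))} {p : String}
    (v : List (String × String)) {R : List String}
    (hb : List.lookup p b' = List.lookup p b)
    (hnone : p ∈ R → List.lookup p b = none)
    (hkeep : ∀ q ∈ R, List.lookup q b' = List.lookup q b) :
    ∀ q ∈ R, List.lookup q (pvStoreSet p v b') = List.lookup q b := by
  intro q hq
  by_cases hqp : q = p
  · subst hqp
    have h0 : List.lookup q b = none := hnone hq
    have hb0 : List.lookup q b' = none := hb.trans h0
    rw [pvStoreSet_of_lookup_none v hb0]
    exact hb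
  · rw [lookup_pvStoreSet_ne v b' hqp]; exact hkeep q hq

theorem pvPreNone {dl : List String} {b t : List (String × List (String × String))}
    (hPre : Pre_get_diff_table_py dl b t) {pre mid : List String} {s : String}
    (hpm : PySem.Str.startswith s "-" = true ∨ PySem.Str.startswith s "+" = true)
    (hdl : dl = pre ++ s :: mid) (hs : pvPayload s ∈ mid.map pvPayload) :
    List.lookup (pvPayload s) b = none ∧ List.lookup (pvPayload s) t = none := by
  apply hPre s (by simp [hdl]) hpm
  have h1 : 0 < (mid.map pvPayload).count (pvPayload s) := List.count_pos_iff.mpr hs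
  have : (dl.map pvPayload).count (pvPayload s)
      = (pre.map pvPayload).count (pvPayload s) + (1 + (mid.map pvPayload).count (pvPayload s)) := by
    simp [hdl, List.count_append, List.count_cons_self]
    omega
  omega

theorem pvMain (dl : List String) (b t : List (String × List (String × String)))
    (hPre : Pre_get_diff_table_py dl b t) :
    ∀ (n : Nat) (l pre : List String)
      (rows : List ((List (String × String)) × (List (String × String))))
      (b' t' : List (String × List (String × String))),
      l.length ≤ n →
      dl = pre ++ l →
      (∀ p ∈ l.map pvPayload, List.lookup p b' = List.lookup p b) →
      (∀ p ∈ l.map pvPayload, List.lookup p t' = List.lookup p t) →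
      (List.foldl (pvStepA dl) (rows, ((pre.length : Int) - 1), b', t')
          (PySem.List.enumerate l (pre.length : Int))).1
        = rows ++ pvLook b t l := by
  intro n
  induction n with
  | zero =>
    intro l pre rows b' t' hn _ _ _
    have : l = [] := List.eq_nil_of_length_eq_zero (Nat.le_zero.mp hn)
    subst this
    simp [PySem.List.enumerate, pvLook]
  | succ n ih =>
    intro l pre rows b' t' hn hdl hb ht
    cases l with
    | nil => simp [PySem.List.enumerate, pvLook]
    | cons d rest =>
      rw [PySem.List.enumerate_cons, List.foldl_cons]
      have hnle : ¬ ((pre.length : Int) ≤ (pre.length : Int) - 1) := by omega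
      have hlen : PySem.List.len dl = (pre.length : Int) + 1 + (rest.length : Int) := by
        rw [hdl, PySem.List.len_eq]; simp; ring
      have hbd : List.lookup (pvPayload d) b' = List.lookup (pvPayload d) b :=
        hb _ (by simp)
      have htd : List.lookup (pvPayload d) t' = List.lookup (pvPayload d) t :=
        ht _ (by simp)
      have hgb : pvGetInfo b' (pvPayload d) = pvGetInfo b (pvPayload d) := by
        unfold pvGetInfo; rw [hbd]
      have hgt : pvGetInfo t' (pvPayload d) = pvGetInfo t (pvPayload d) := by
        unfold pvGetInfo; rw [htd]
      have hbrest : ∀ p ∈ rest.map pvPayload, List.lookup p b' = List.lookup p b :=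
        fun p hp => hb p (by simp [hp])
      have htrest : ∀ p ∈ rest.map pvPayload, List.lookup p t' = List.lookup p t :=
        fun p hp => ht p (by simp [hp])
      have hpre1 : ((pre ++ [d]).length : Int) = (pre.length : Int) + 1 := by
        simp
      -- one-element advance: rewrite the IH at pre ++ [d]
      have step1 : ∀ (rows' : List ((List (String × String)) × (List (String × String))))
          (b'' t'' : List (String × List (String × String))),
          (∀ p ∈ rest.map pvPayload, List.lookup p b'' = List.lookup p b) →
          (∀ p ∈ rest.map pvPayload, List.lookup p t'' = List.lookup p t) →
          (List.foldl (pvStepA dl) (rows', (pre.length : Int), b'', t'')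
              (PySem.List.enumerate rest ((pre.length : Int) + 1))).1
            = rows' ++ pvLook b t rest := by
        intro rows' b'' t'' hb'' ht''
        have := ih rest (pre ++ [d]) rows' b'' t''
          (by simpa using Nat.lt_succ_iff.mp hn) (by simp [hdl]) hb'' ht''
        rw [hpre1] at this
        simpa using this
      by_cases hq : PySem.Str.startswith d "?" = true
      · -- '?' line: skipped
        have hstep : pvStepA dl (rows, (pre.length : Int) - 1, b', t') ((pre.length : Int), d)
            = (rows, (pre.length : Int), b', t') := by
          simp only [pvStepA]; rw [if_neg hnle, if_pos hq]
        rw [hstep, step1 rows b' t' hbrest htrest, pvLook]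
        rw [if_pos hq]
      · by_cases hsame : (!PySem.Str.startswith d "+" && !PySem.Str.startswith d "-") = true
        · -- unchanged line
          have hstep : pvStepA dl (rows, (pre.length : Int) - 1, b', t') ((pre.length : Int), d)
              = (rows ++ [(pvGetInfo b (pvPayload d), pvGetInfo t (pvPayload d))],
                 (pre.length : Int), b', t') := by
            simp only [pvStepA]
            rw [if_neg hnle, if_neg hq, if_pos hsame, hgb, hgt]
          rw [hstep, step1 _ b' t' hbrest htrest, pvLook]
          rw [if_neg hq, if_pos hsame]
          simp
        · -- a '-' or '+' line
          have hqC : PySem.Chars.startswith d.toList ['?'] = false := by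
            simpa using hq
          by_cases hminus : PySem.Str.startswith d "-" = true
          · -- '-' line
            have hminusC : PySem.Chars.startswith d.toList ['-'] = true := by
              simpa using hminus
            cases rest with
            | nil =>
              -- last line: next_diff is None
              have hnone : ¬ ((pre.length : Int) < PySem.List.len dl - 1) := by
                rw [hlen]; simp only [List.length_nil]; omega
              have hstep : pvStepA dl (rows, (pre.length : Int) - 1, b', t')
                    ((pre.length : Int), d)
                  = (rows ++ [(pvSetColor "#ffaaaa" (pvGetInfo b (pvPayload d)), [])],
                     (pre.length : Int),
                     pvStoreSet (pvPayload d) (pvSetColor "#ffaaaa" (pvGetInfo b (pvPayload d))) b',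
                     t') := by
                simp only [pvStepA]
                rw [if_neg hnle, if_neg hq, if_neg hsame, if_pos hminus, if_neg hnone, hgb]
              rw [hstep]
              rw [show PySem.List.enumerate ([] : List String) ((pre.length : Int) + 1) = [] from rfl,
                List.foldl_nil]
              rw [pvLook]
              simp [hqC, hminusC]
            | cons nd rest' =>
              have hlt : ((pre.length : Int) < PySem.List.len dl - 1) := by
                rw [hlen]; simp only [List.length_cons]; push_cast; omega
              have hnd : PySem.List.pyGet? dl ((pre.length : Int) + 1) = some nd := by
                rw [hdl]
                simpa using PySem.List.pyGet?_append_right pre (d :: nd :: rest') 1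
              have hgtnd : pvGetInfo t' (pvPayload nd) = pvGetInfo t (pvPayload nd) := by
                unfold pvGetInfo; rw [ht _ (by simp)]
              by_cases hplus : PySem.Str.startswith nd "+" = true
              · -- paired '-' then '+': consume two lines
                have hplusC : PySem.Chars.startswith nd.toList ['+'] = true := by
                  simpa using hplus
                have hnd_ne : ¬ (nd = "") := by
                  intro h; rw [h] at hplus; exact absurd hplus (by decide)
                have hcond : (!(nd == "") && PySem.Str.startswith nd "+") = true := by
                  rw [hplus]; simp [hnd_ne]
                have hstep : pvStepA dl (rows, (pre.length : Int) - 1, b', t')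
                      ((pre.length : Int), d)
                    = (rows ++ [(pvSetColor "#ffaaaa" (pvGetInfo b (pvPayload d)),
                                 pvSetColor "#aaffaa" (pvGetInfo t (pvPayload nd)))],
                       (pre.length : Int) + 1,
                       pvStoreSet (pvPayload d) (pvSetColor "#ffaaaa" (pvGetInfo b (pvPayload d))) b',
                       pvStoreSet (pvPayload nd) (pvSetColor "#aaffaa" (pvGetInfo t (pvPayload nd))) t') := by
                  simp only [pvStepA]
                  rw [if_neg hnle, if_neg hq, if_neg hsame, if_pos hminus, if_pos hlt, hnd]
                  simp only [hcond, if_true]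
                  rw [hgb, hgtnd]
                rw [hstep, PySem.List.enumerate_cons, List.foldl_cons]
                have hskip : pvStepA dl
                    (rows ++ [(pvSetColor "#ffaaaa" (pvGetInfo b (pvPayload d)),
                               pvSetColor "#aaffaa" (pvGetInfo t (pvPayload nd)))],
                     (pre.length : Int) + 1,
                     pvStoreSet (pvPayload d) (pvSetColor "#ffaaaa" (pvGetInfo b (pvPayload d))) b',
                     pvStoreSet (pvPayload nd) (pvSetColor "#aaffaa" (pvGetInfo t (pvPayload nd))) t')
                    ((pre.length : Int) + 1, nd)
                    = (rows ++ [(pvSetColor "#ffaaaa" (pvGetInfo b (pvPayload d)),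
                                 pvSetColor "#aaffaa" (pvGetInfo t (pvPayload nd)))],
                       (pre.length : Int) + 1,
                       pvStoreSet (pvPayload d) (pvSetColor "#ffaaaa" (pvGetInfo b (pvPayload d))) b',
                       pvStoreSet (pvPayload nd) (pvSetColor "#aaffaa" (pvGetInfo t (pvPayload nd))) t') := by
                  simp only [pvStepA]
                  rw [if_pos (le_refl ((pre.length : Int) + 1))]
                rw [hskip]
                -- IH at pre ++ [d, nd]
                have hpre2 : (((pre ++ [d, nd]).length : Int)) = (pre.length : Int) + 2 := by
                  simp
                have hbkeep : ∀ q ∈ rest'.map pvPayload,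
                    List.lookup q (pvStoreSet (pvPayload d)
                      (pvSetColor "#ffaaaa" (pvGetInfo b (pvPayload d))) b') = List.lookup q b := by
                  apply pvWriteKeep _ hbd
                  · intro hmem
                    exact (pvPreNone hPre (Or.inl hminus) hdl (by simp [hmem])).1
                  · exact fun q hq' => hbrest q (by simp [hq'])
                have htkeep : ∀ q ∈ rest'.map pvPayload,
                    List.lookup q (pvStoreSet (pvPayload nd)
                      (pvSetColor "#aaffaa" (pvGetInfo t (pvPayload nd))) t') = List.lookup q t := by
                  apply pvWriteKeep _ (ht _ (by simp))
                  · intro hmem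
                    exact (pvPreNone hPre (Or.inr hplus) (pre := pre ++ [d]) (by simp [hdl]) hmem).2
                  · exact fun q hq' => htrest q (by simp [hq'])
                have hih := ih rest' (pre ++ [d, nd])
                  (rows ++ [(pvSetColor "#ffaaaa" (pvGetInfo b (pvPayload d)),
                             pvSetColor "#aaffaa" (pvGetInfo t (pvPayload nd)))])
                  (pvStoreSet (pvPayload d) (pvSetColor "#ffaaaa" (pvGetInfo b (pvPayload d))) b')
                  (pvStoreSet (pvPayload nd) (pvSetColor "#aaffaa" (pvGetInfo t (pvPayload nd))) t')
                  (by simp at hn ⊢; omega) (by simp [hdl]) hbkeep htkeep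
                rw [hpre2] at hih
                have harith : (pre.length : Int) + 2 - 1 = (pre.length : Int) + 1 := by ring
                rw [harith,
                  show ((pre.length : Int) + 2) = ((pre.length : Int) + 1 + 1) from by ring] at hih
                rw [hih]
                rw [pvLook]
                simp [hqC, hminusC, hplusC]
              · -- '-' not followed by '+'
                have hplusC : PySem.Chars.startswith nd.toList ['+'] = false := by
                  simpa using hplus
                have hplusF : PySem.Str.startswith nd "+" = false := by
                  simpa using hplus
                have hcond : (!(nd == "") && PySem.Str.startswith nd "+") = false := by
                  rw [hplusF]; simp
                have hstep : pvStepA dl (rows, (pre.length : Int) - 1, b', t')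
                      ((pre.length : Int), d)
                    = (rows ++ [(pvSetColor "#ffaaaa" (pvGetInfo b (pvPayload d)), [])],
                       (pre.length : Int),
                       pvStoreSet (pvPayload d) (pvSetColor "#ffaaaa" (pvGetInfo b (pvPayload d))) b',
                       t') := by
                  simp only [pvStepA]
                  rw [if_neg hnle, if_neg hq, if_neg hsame, if_pos hminus, if_pos hlt, hnd]
                  simp only [hcond, Bool.false_eq_true, if_false]
                  rw [hgb]
                have hbkeep : ∀ q ∈ (nd :: rest').map pvPayload,
                    List.lookup q (pvStoreSet (pvPayload d)
                      (pvSetColor "#ffaaaa" (pvGetInfo b (pvPayload d))) b') = List.lookup q b := by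
                  apply pvWriteKeep _ hbd
                  · intro hmem
                    exact (pvPreNone hPre (Or.inl hminus) hdl hmem).1
                  · exact hbrest
                rw [hstep, step1 _ _ t' hbkeep htrest]
                conv_rhs => rw [pvLook]
                simp [hqC, hminusC, hplusC]
          · -- '+' line
            have hminusC : PySem.Chars.startswith d.toList ['-'] = false := by
              simpa using hminus
            have hminusF : PySem.Str.startswith d "-" = false := by
              revert hminus; cases PySem.Str.startswith d "-" <;> simp
            have hplusd : PySem.Str.startswith d "+" = true := by
              by_contra hno
              have hF : PySem.Str.startswith d "+" = false := by
                revert hno; cases PySem.Str.startswith d "+" <;> simp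
              exact hsame (by rw [hF, hminusF]; rfl)
            have hplusdC : PySem.Chars.startswith d.toList ['+'] = true := by
              simpa using hplusd
            cases rest with
            | nil =>
              have hnone : ¬ ((pre.length : Int) < PySem.List.len dl - 1) := by
                rw [hlen]; simp only [List.length_nil]; omega
              have hstep : pvStepA dl (rows, (pre.length : Int) - 1, b', t')
                    ((pre.length : Int), d)
                  = (rows ++ [([], pvSetColor "#aaffaa" (pvGetInfo t (pvPayload d)))],
                     (pre.length : Int), b',
                     pvStoreSet (pvPayload d) (pvSetColor "#aaffaa" (pvGetInfo t (pvPayload d))) t') := by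
                simp only [pvStepA]
                rw [if_neg hnle, if_neg hq, if_neg hsame, if_neg hminus, if_neg hnone, hgt]
              rw [hstep]
              rw [show PySem.List.enumerate ([] : List String) ((pre.length : Int) + 1) = [] from rfl,
                List.foldl_nil]
              rw [pvLook]
              simp [hqC, hminusC, hplusdC]
            | cons nd rest' =>
              have hlt : ((pre.length : Int) < PySem.List.len dl - 1) := by
                rw [hlen]; simp only [List.length_cons]; push_cast; omega
              have hnd : PySem.List.pyGet? dl ((pre.length : Int) + 1) = some nd := by
                rw [hdl]
                simpa using PySem.List.pyGet?_append_right pre (d :: nd :: rest') 1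
              have hgbnd : pvGetInfo b' (pvPayload nd) = pvGetInfo b (pvPayload nd) := by
                unfold pvGetInfo; rw [hb _ (by simp)]
              by_cases hminus2 : PySem.Str.startswith nd "-" = true
              · -- paired '+' then '-': consume two lines
                have hminus2C : PySem.Chars.startswith nd.toList ['-'] = true := by
                  simpa using hminus2
                have hnd_ne : ¬ (nd = "") := by
                  intro h; rw [h] at hminus2; exact absurd hminus2 (by decide)
                have hcond : (!(nd == "") && PySem.Str.startswith nd "-") = true := by
                  rw [hminus2]; simp [hnd_ne]
                have hstep : pvStepA dl (rows, (pre.length : Int) - 1, b', t')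
                      ((pre.length : Int), d)
                    = (rows ++ [(pvSetColor "#ffaaaa" (pvGetInfo b (pvPayload nd)),
                                 pvSetColor "#aaffaa" (pvGetInfo t (pvPayload d)))],
                       (pre.length : Int) + 1,
                       pvStoreSet (pvPayload nd) (pvSetColor "#ffaaaa" (pvGetInfo b (pvPayload nd))) b',
                       pvStoreSet (pvPayload d) (pvSetColor "#aaffaa" (pvGetInfo t (pvPayload d))) t') := by
                  simp only [pvStepA]
                  rw [if_neg hnle, if_neg hq, if_neg hsame, if_neg hminus, if_pos hlt, hnd]
                  simp only [hcond, if_true]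
                  rw [hgt, hgbnd]
                rw [hstep, PySem.List.enumerate_cons, List.foldl_cons]
                have hskip : pvStepA dl
                    (rows ++ [(pvSetColor "#ffaaaa" (pvGetInfo b (pvPayload nd)),
                               pvSetColor "#aaffaa" (pvGetInfo t (pvPayload d)))],
                     (pre.length : Int) + 1,
                     pvStoreSet (pvPayload nd) (pvSetColor "#ffaaaa" (pvGetInfo b (pvPayload nd))) b',
                     pvStoreSet (pvPayload d) (pvSetColor "#aaffaa" (pvGetInfo t (pvPayload d))) t')
                    ((pre.length : Int) + 1, nd)
                    = (rows ++ [(pvSetColor "#ffaaaa" (pvGetInfo b (pvPayload nd)),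
                                 pvSetColor "#aaffaa" (pvGetInfo t (pvPayload d)))],
                       (pre.length : Int) + 1,
                       pvStoreSet (pvPayload nd) (pvSetColor "#ffaaaa" (pvGetInfo b (pvPayload nd))) b',
                       pvStoreSet (pvPayload d) (pvSetColor "#aaffaa" (pvGetInfo t (pvPayload d))) t') := by
                  simp only [pvStepA]
                  rw [if_pos (le_refl ((pre.length : Int) + 1))]
                rw [hskip]
                have hpre2 : (((pre ++ [d, nd]).length : Int)) = (pre.length : Int) + 2 := by
                  simp
                have hbkeep : ∀ q ∈ rest'.map pvPayload,
                    List.lookup q (pvStoreSet (pvPayload nd)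
                      (pvSetColor "#ffaaaa" (pvGetInfo b (pvPayload nd))) b') = List.lookup q b := by
                  apply pvWriteKeep _ (hb _ (by simp))
                  · intro hmem
                    exact (pvPreNone hPre (Or.inl hminus2) (pre := pre ++ [d]) (by simp [hdl]) hmem).1
                  · exact fun q hq' => hbrest q (by simp [hq'])
                have htkeep : ∀ q ∈ rest'.map pvPayload,
                    List.lookup q (pvStoreSet (pvPayload d)
                      (pvSetColor "#aaffaa" (pvGetInfo t (pvPayload d))) t') = List.lookup q t := by
                  apply pvWriteKeep _ htd
                  · intro hmem
                    exact (pvPreNone hPre (Or.inr hplusd) hdl (by simp [hmem])).2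
                  · exact fun q hq' => htrest q (by simp [hq'])
                have hih := ih rest' (pre ++ [d, nd])
                  (rows ++ [(pvSetColor "#ffaaaa" (pvGetInfo b (pvPayload nd)),
                             pvSetColor "#aaffaa" (pvGetInfo t (pvPayload d)))])
                  (pvStoreSet (pvPayload nd) (pvSetColor "#ffaaaa" (pvGetInfo b (pvPayload nd))) b')
                  (pvStoreSet (pvPayload d) (pvSetColor "#aaffaa" (pvGetInfo t (pvPayload d))) t')
                  (by simp at hn ⊢; omega) (by simp [hdl]) hbkeep htkeep
                rw [hpre2] at hih
                have harith : (pre.length : Int) + 2 - 1 = (pre.length : Int) + 1 := by ring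
                rw [harith,
                  show ((pre.length : Int) + 2) = ((pre.length : Int) + 1 + 1) from by ring] at hih
                rw [hih]
                rw [pvLook]
                simp [hqC, hminusC, hplusdC, hminus2C]
              · -- '+' not followed by '-'
                have hminus2C : PySem.Chars.startswith nd.toList ['-'] = false := by
                  simpa using hminus2
                have hminus2F : PySem.Str.startswith nd "-" = false := by
                  simpa using hminus2
                have hcond : (!(nd == "") && PySem.Str.startswith nd "-") = false := by
                  rw [hminus2F]; simp
                have hstep : pvStepA dl (rows, (pre.length : Int) - 1, b', t')
                      ((pre.length : Int), d)
                    = (rows ++ [([], pvSetColor "#aaffaa" (pvGetInfo t (pvPayload d)))],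
                       (pre.length : Int), b',
                       pvStoreSet (pvPayload d) (pvSetColor "#aaffaa" (pvGetInfo t (pvPayload d))) t') := by
                  simp only [pvStepA]
                  rw [if_neg hnle, if_neg hq, if_neg hsame, if_neg hminus, if_pos hlt, hnd]
                  simp only [hcond, Bool.false_eq_true, if_false]
                  rw [hgt]
                have htkeep : ∀ q ∈ (nd :: rest').map pvPayload,
                    List.lookup q (pvStoreSet (pvPayload d)
                      (pvSetColor "#aaffaa" (pvGetInfo t (pvPayload d))) t') = List.lookup q t := by
                  apply pvWriteKeep _ htd
                  · intro hmem
                    exact (pvPreNone hPre (Or.inr hplusd) hdl hmem).2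
                  · exact htrest
                rw [hstep, step1 _ b' _ hbrest htkeep]
                conv_rhs => rw [pvLook]
                simp [hqC, hminusC, hplusdC, hminus2C]

-- one-step unfolding lemmas for the WF-recursive automaton
theorem autoNilNone (b t : List (String × List (String × String))) :
    pvAutoB b t none [] = [] := by rw [pvAutoB]

theorem autoNilSome (b t : List (String × List (String × String))) (p : String) :
    pvAutoB b t (some p) [] = [pvAlone p b t] := by rw [pvAutoB]

theorem autoQ (b t : List (String × List (String × String))) (line : String)
    (rest : List String) (hq : PySem.Chars.startswith line.toList ['?'] = true) :
    pvAutoB b t none (line :: rest) = pvAutoB b t none rest := by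
  rw [pvAutoB]; simp [hq]

theorem autoPend (b t : List (String × List (String × String))) (line : String)
    (rest : List String) (hq : PySem.Chars.startswith line.toList ['?'] = false)
    (hpm : (PySem.Chars.startswith line.toList ['-'] || PySem.Chars.startswith line.toList ['+']) = true) :
    pvAutoB b t none (line :: rest) = pvAutoB b t (some line) rest := by
  rw [pvAutoB]; simp [hq, hpm]

theorem autoSame (b t : List (String × List (String × String))) (line : String)
    (rest : List String) (hq : PySem.Chars.startswith line.toList ['?'] = false)
    (hm : PySem.Chars.startswith line.toList ['-'] = false)
    (hp : PySem.Chars.startswith line.toList ['+'] = false) :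
    pvAutoB b t none (line :: rest)
      = (pvGetInfo b (pvPayload line), pvGetInfo t (pvPayload line)) :: pvAutoB b t none rest := by
  rw [pvAutoB]; simp [hq, hm, hp]

theorem autoPairSub (b t : List (String × List (String × String))) (p line : String)
    (rest : List String) (hm : PySem.Chars.startswith p.toList ['-'] = true)
    (hp : PySem.Chars.startswith line.toList ['+'] = true) :
    pvAutoB b t (some p) (line :: rest)
      = (pvColored b p "#ffaaaa", pvColored t line "#aaffaa") :: pvAutoB b t none rest := by
  rw [pvAutoB]; simp [hm, hp]

theorem autoNoPairSub (b t : List (String × List (String × String))) (p line : String)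
    (rest : List String) (hm : PySem.Chars.startswith p.toList ['-'] = true)
    (hp : PySem.Chars.startswith line.toList ['+'] = false) :
    pvAutoB b t (some p) (line :: rest) = pvAlone p b t :: pvAutoB b t none (line :: rest) := by
  rw [pvAutoB]; simp [hm, hp]

theorem autoPairAdd (b t : List (String × List (String × String))) (p line : String)
    (rest : List String) (hm : PySem.Chars.startswith p.toList ['-'] = false)
    (hp : PySem.Chars.startswith line.toList ['-'] = true) :
    pvAutoB b t (some p) (line :: rest)
      = (pvColored b line "#ffaaaa", pvColored t p "#aaffaa") :: pvAutoB b t none rest := by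
  rw [pvAutoB]; simp [hm, hp]

theorem autoNoPairAdd (b t : List (String × List (String × String))) (p line : String)
    (rest : List String) (hm : PySem.Chars.startswith p.toList ['-'] = false)
    (hp : PySem.Chars.startswith line.toList ['-'] = false) :
    pvAutoB b t (some p) (line :: rest) = pvAlone p b t :: pvAutoB b t none (line :: rest) := by
  rw [pvAutoB]; simp [hm, hp]

-- bridge: the pending-carry automaton computes the lookahead scan
theorem pvAuto_eq_pvLook (b t : List (String × List (String × String))) :
    ∀ (n : Nat) (l : List String), l.length ≤ n → pvAutoB b t none l = pvLook b t l := by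
  intro n
  induction n with
  | zero =>
    intro l hn
    have : l = [] := List.eq_nil_of_length_eq_zero (Nat.le_zero.mp hn)
    subst this
    rw [autoNilNone, pvLook]
  | succ n ih =>
    intro l hn
    cases l with
    | nil => rw [autoNilNone, pvLook]
    | cons line rest =>
      have hrest : rest.length ≤ n := Nat.lt_succ_iff.mp hn
      by_cases hq : PySem.Str.startswith line "?" = true
      · have hqC : PySem.Chars.startswith line.toList ['?'] = true := by simpa using hq
        rw [autoQ b t line rest hqC, ih rest hrest, pvLook, if_pos hq]
      · have hqC : PySem.Chars.startswith line.toList ['?'] = false := by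
          simpa using hq
        by_cases hminus : PySem.Str.startswith line "-" = true
        · have hmC : PySem.Chars.startswith line.toList ['-'] = true := by simpa using hminus
          have hnsame : ¬ ((!PySem.Str.startswith line "+" && !PySem.Str.startswith line "-") = true) := by
            rw [hminus]; simp
          rw [autoPend b t line rest hqC (by rw [hmC];simp), pvLook, if_neg hq, if_neg hnsame,
            if_pos hminus]
          cases rest with
          | nil =>
            rw [autoNilSome]
            simp [pvAlone, pvColored, hmC]
          | cons nxt rest' =>
            by_cases hp : PySem.Str.startswith nxt "+" = true
            · have hpC : PySem.Chars.startswith nxt.toList ['+'] = true := by simpa using hp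
              rw [autoPairSub b t line nxt rest' hmC hpC,
                ih rest' (by simp at hrest ⊢; omega)]
              simp [hpC, pvColored]
            · have hpC : PySem.Chars.startswith nxt.toList ['+'] = false := by simpa using hp
              rw [autoNoPairSub b t line nxt rest' hmC hpC, ih (nxt :: rest') hrest]
              simp [hpC, pvAlone, pvColored, hmC]
        · have hmC : PySem.Chars.startswith line.toList ['-'] = false := by simpa using hminus
          by_cases hplus : PySem.Str.startswith line "+" = true
          · have hpdC : PySem.Chars.startswith line.toList ['+'] = true := by simpa using hplus
            have hnsame : ¬ ((!PySem.Str.startswith line "+" && !PySem.Str.startswith line "-") = true) := by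
              rw [hplus]; simp
            rw [autoPend b t line rest hqC (by rw [hmC, hpdC]; simp), pvLook, if_neg hq,
              if_neg hnsame, if_neg hminus]
            cases rest with
            | nil =>
              rw [autoNilSome]
              simp [pvAlone, pvColored, hmC]
            | cons nxt rest' =>
              by_cases hm2 : PySem.Str.startswith nxt "-" = true
              · have hm2C : PySem.Chars.startswith nxt.toList ['-'] = true := by simpa using hm2
                rw [autoPairAdd b t line nxt rest' hmC hm2C,
                  ih rest' (by simp at hrest ⊢; omega)]
                simp [hm2C, pvColored]
              · have hm2C : PySem.Chars.startswith nxt.toList ['-'] = false := by simpa using hm2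
                rw [autoNoPairAdd b t line nxt rest' hmC hm2C, ih (nxt :: rest') hrest]
                simp [hm2C, pvAlone, pvColored, hmC]
          · have hpdC : PySem.Chars.startswith line.toList ['+'] = false := by simpa using hplus
            have hsame : (!PySem.Str.startswith line "+" && !PySem.Str.startswith line "-") = true := by
              simp [hmC, hpdC]
            rw [autoSame b t line rest hqC hmC hpdC, ih rest hrest, pvLook, if_neg hq,
              if_pos hsame]

-- ===== VERDICT (by name: the statement is the Claim_ definition above) =====
theorem get_diff_table_py_spec : Claim_equal_get_diff_table_py := by
  intro dl b t _hDom hPre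
  unfold Spec_get_diff_table_py get_diff_table_py get_diff_table_py_alt
  have h := pvMain dl b t hPre dl.length dl [] [] b t le_rfl (by simp)
    (fun _ _ => rfl) (fun _ _ => rfl)
  rw [pvAuto_eq_pvLook b t dl.length dl le_rfl]
  simpa using h
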